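-- pv_equiv track=rewrite | github.com/sudpaul/Research_Intelligence | scopus_api_retrive/UNSW_med_theme.py | check_theme
-- ===== SOURCE A (Python) =====
-- def check_theme(subjects):
--
--     """The function input is SCOPUS author subjects area and it maps to medicine
--     theme ASJC codes. Return the theme_subjects and map to aggregate theme result.
--
--     Parameters
--     ----------
--     subjects : dict
--                Subject categories of Scopus author Subject areas
--     Returns
--     ----------
--     theme_subjects : dict
--                      Mapping of the ASJC codes of SCOPUS subjects to theme_subjects
--
--     result : dict
--              aggregate result of the theme mapping
--     """
--
--     from collections import defaultdict
--     result = defaultdict(int)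
--
--     data_set = {'Cancer Research','Oncology', 'Cancer', 'Radiation', 'Oncology(nursing)',
--             'Endocrinology','General Immunology and Microbiology','Immunology and Microbiology (miscellaneous)',
--             'Immunology', 'Microbiology','Immunology and Allergy', 'Microbiology (medical)',
--             'Parasitology', 'Virology', 'Dermatology', 'Allergy', 'Infectious Diseases',
--             'Rheumatology', 'Toxicology', 'Clinical Neurology','Psychiatry and Mental Health',
--             'General Neuroscience', 'Neuroscience (miscellaneous)' , 'Behavioral Neuroscience',
--             'Biological Psychiatry','Cellular and Molecular Neuroscience','Cognitive Neuroscience',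
--             'Developmental Neuroscience', 'Neurology' ,'Psychiatry Mental Health','Psychology (miscellaneous)',
--             'Experimental and Cognitive Psychology', 'Neuropsychology and Physiological Psychology',
--             'Cardiology', 'Cardiovascular Medicine','Cardiology and Cardiovascular Medicine', 'Critical Care and Intensive Care Medicine',
--             'Emergency Medicine','Endocrinology, Diabetes and Metabolism','Pulmonary and Respiratory Medicine','Epidemiology','Family Practice',
--             'Gastroenterology','Health Informatics','Health Policy','Hematology','Hepatology', 'Internal Medicine','Nephrology', 'Ophthalmology',
--             'Orthopedics and Sports Medicine', 'Otorhinolaryngology', 'Transplantation','Urology', 'Critical Care','Respiratory Care'}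
--
--
--     theme_dict = {'Cancer' : {'Cancer Research','Oncology', 'Cancer', 'Radiation', 'Oncology(nursing)'} ,
--                   'Triple I' : {'Endocrinology','General Immunology and Microbiology','Immunology and Microbiology (miscellaneous)',
--                                 'Immunology', 'Microbiology','Immunology and Allergy', 'Microbiology (medical)',
--                   'Parasitology', 'Virology', 'Dermatology', 'Allergy', 'Infectious Diseases',
--                   'Rheumatology', 'Toxicology'},
--                    'NMHA' : {'Clinical Neurology','Psychiatry and Mental Health', 'General Neuroscience',
--                    'Neuroscience (miscellaneous)' , 'Behavioral Neuroscience',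
--                    'Biological Psychiatry','Cellular and Molecular Neuroscience','Cognitive Neuroscience',
--                    'Developmental Neuroscience', 'Neurology' ,'Psychiatry Mental Health','Psychology (miscellaneous)',
--                    'Experimental and Cognitive Psychology', 'Neuropsychology and Physiological Psychology'},
--                    'NCD' : {'Cardiology', 'Cardiovascular Medicine','Cardiology and Cardiovascular Medicine',
--                             'Critical Care and Intensive Care Medicine', 'Emergency Medicine','Endocrinology, Diabetes and Metabolism',
--                             'Pulmonary and Respiratory Medicine','Epidemiology','Family Practice', 'Gastroenterology',
--                             'Health Informatics','Health Policy','Hematology','Hepatology', 'Internal Medicine','Nephrology',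
--                             'Ophthalmology', 'Orthopedics and Sports Medicine', 'Otorhinolaryngology', 'Transplantation','Urology',
--                             'Critical Care','Respiratory Care'}}
--     #Filter the author publication subjects ASJC codes to UNSW med theme ASJC listed codes
--     theme_subjects = {key:value for key, value in subjects.items() if key in data_set}
--     #If ASJC codes are matched then mapped to the data dictionary of theme Subjects
--     if theme_subjects:
--         for theme, match in theme_dict.items():
--             for subject in theme_subjects:
--                if subject in match:
--                   result[theme] += theme_subjects[subject]
--         return theme_subjects, dict(result)
--     else:
--         return subjects, None
-- ===== SOURCE B (Python) =====
-- # Same mapping, but via a precomputed reverse index subject -> theme slot and a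
-- # single pass over the filtered subjects with four accumulators (no nested
-- # theme x subject scan).
--
-- _THEMES = [
--     ('Cancer', {'Cancer Research', 'Oncology', 'Cancer', 'Radiation', 'Oncology(nursing)'}),
--     ('Triple I', {'Endocrinology', 'General Immunology and Microbiology',
--                   'Immunology and Microbiology (miscellaneous)', 'Immunology', 'Microbiology',
--                   'Immunology and Allergy', 'Microbiology (medical)', 'Parasitology', 'Virology',
--                   'Dermatology', 'Allergy', 'Infectious Diseases', 'Rheumatology', 'Toxicology'}),
--     ('NMHA', {'Clinical Neurology', 'Psychiatry and Mental Health', 'General Neuroscience',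
--               'Neuroscience (miscellaneous)', 'Behavioral Neuroscience', 'Biological Psychiatry',
--               'Cellular and Molecular Neuroscience', 'Cognitive Neuroscience',
--               'Developmental Neuroscience', 'Neurology', 'Psychiatry Mental Health',
--               'Psychology (miscellaneous)', 'Experimental and Cognitive Psychology',
--               'Neuropsychology and Physiological Psychology'}),
--     ('NCD', {'Cardiology', 'Cardiovascular Medicine', 'Cardiology and Cardiovascular Medicine',
--              'Critical Care and Intensive Care Medicine', 'Emergency Medicine',
--              'Endocrinology, Diabetes and Metabolism', 'Pulmonary and Respiratory Medicine',
--              'Epidemiology', 'Family Practice', 'Gastroenterology', 'Health Informatics',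
--              'Health Policy', 'Hematology', 'Hepatology', 'Internal Medicine', 'Nephrology',
--              'Ophthalmology', 'Orthopedics and Sports Medicine', 'Otorhinolaryngology',
--              'Transplantation', 'Urology', 'Critical Care', 'Respiratory Care'}),
-- ]
--
-- # reverse index: subject -> position of its (unique) theme in _THEMES
-- _REVERSE = {s: i for i, (_name, members) in enumerate(_THEMES) for s in members}
--
--
-- def check_theme(subjects):
--     theme_subjects = {k: v for k, v in subjects.items() if k in _REVERSE}
--     if not theme_subjects:
--         return subjects, None
--     sums = [0, 0, 0, 0]
--     hit = [False, False, False, False]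
--     for k, v in theme_subjects.items():
--         i = _REVERSE[k]
--         sums[i] = sums[i] + v
--         hit[i] = True
--     result = {_THEMES[i][0]: sums[i] for i in range(4) if hit[i]}
--     return theme_subjects, result
-- ===== Notes on version B (the rewrite author's own statement) =====
-- stated objective: alternative
-- what changed: Replaces A's filter against a flat 56-element set plus a nested theme-by-subject double loop into a defaultdict with a precomputed reverse index subject-to-theme-slot and one single pass over the filtered subjects that keeps four sum/hit accumulators, emitting the result in fixed theme order.
import Mathlib
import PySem

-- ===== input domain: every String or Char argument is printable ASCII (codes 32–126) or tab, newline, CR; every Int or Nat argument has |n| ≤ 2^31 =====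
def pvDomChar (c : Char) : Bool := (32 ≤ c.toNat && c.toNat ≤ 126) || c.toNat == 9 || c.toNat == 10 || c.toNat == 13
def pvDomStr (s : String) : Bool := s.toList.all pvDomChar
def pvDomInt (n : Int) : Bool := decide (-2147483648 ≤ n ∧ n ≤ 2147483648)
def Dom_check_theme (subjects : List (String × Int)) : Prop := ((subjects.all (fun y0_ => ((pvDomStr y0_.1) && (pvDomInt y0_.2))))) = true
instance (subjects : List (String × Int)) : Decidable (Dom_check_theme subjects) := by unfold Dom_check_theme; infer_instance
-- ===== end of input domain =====

-- B replaces A's filter-against-a-flat-set plus nested theme×subject scans by a precomputed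
-- reverse index subject→theme slot and one pass with four accumulators (objective: alternative).

-- ===== PORT A =====
-- the four theme member sets (Python set literals; only membership is used, order as written)
def pvSetCancer : List String := ["Cancer Research", "Oncology", "Cancer", "Radiation", "Oncology(nursing)"]
def pvSetTriple : List String := ["Endocrinology", "General Immunology and Microbiology",
  "Immunology and Microbiology (miscellaneous)", "Immunology", "Microbiology",
  "Immunology and Allergy", "Microbiology (medical)", "Parasitology", "Virology",
  "Dermatology", "Allergy", "Infectious Diseases", "Rheumatology", "Toxicology"]
def pvSetNMHA : List String := ["Clinical Neurology", "Psychiatry and Mental Health", "General Neuroscience",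
  "Neuroscience (miscellaneous)", "Behavioral Neuroscience", "Biological Psychiatry",
  "Cellular and Molecular Neuroscience", "Cognitive Neuroscience", "Developmental Neuroscience",
  "Neurology", "Psychiatry Mental Health", "Psychology (miscellaneous)",
  "Experimental and Cognitive Psychology", "Neuropsychology and Physiological Psychology"]
def pvSetNCD : List String := ["Cardiology", "Cardiovascular Medicine", "Cardiology and Cardiovascular Medicine",
  "Critical Care and Intensive Care Medicine", "Emergency Medicine", "Endocrinology, Diabetes and Metabolism",
  "Pulmonary and Respiratory Medicine", "Epidemiology", "Family Practice", "Gastroenterology",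
  "Health Informatics", "Health Policy", "Hematology", "Hepatology", "Internal Medicine", "Nephrology",
  "Ophthalmology", "Orthopedics and Sports Medicine", "Otorhinolaryngology", "Transplantation",
  "Urology", "Critical Care", "Respiratory Care"]
-- A's data_set: the same 56 distinct strings (it is exactly the union of the four theme sets)
def pvDataSet : List String := pvSetCancer ++ pvSetTriple ++ pvSetNMHA ++ pvSetNCD
-- A's theme_dict, in its insertion order
def pvThemeDict : List (String × List String) :=
  [("Cancer", pvSetCancer), ("Triple I", pvSetTriple), ("NMHA", pvSetNMHA), ("NCD", pvSetNCD)]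

def check_theme (subjects : List (String × Int)) : (List (String × Int)) × (Option (List (String × Int))) :=
  let theme_subjects : PySem.Dict String Int :=
    PySem.Dict.mk (subjects.filter (fun p => pvDataSet.contains p.1))
  if theme_subjects.items ≠ [] then
    -- defaultdict(int): result[theme] += theme_subjects[subject]; the key p.1 is always
    -- present in theme_subjects, so getD … 0 is exactly Python's theme_subjects[subject]
    let result : PySem.Dict String Int :=
      pvThemeDict.foldl (fun result tm =>
        theme_subjects.items.foldl (fun result p =>
          if tm.2.contains p.1 then
            result.insert tm.1 (result.getD tm.1 0 + theme_subjects.getD p.1 0)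
          else result) result)
        (PySem.Dict.mk [])
    (theme_subjects.items, some result.items)
  else (subjects, none)

-- ===== PORT B =====
-- _REVERSE = {s: i for i, (name, members) in enumerate(_THEMES) for s in members}
def pvReverse : List (String × Nat) :=
  pvThemeDict.zipIdx.flatMap (fun it => it.1.2.map (fun s => (s, it.2)))

def check_theme_alt (subjects : List (String × Int)) : (List (String × Int)) × (Option (List (String × Int))) :=
  let theme_subjects := subjects.filter (fun p => ((PySem.Dict.mk pvReverse).get? p.1).isSome)
  if theme_subjects ≠ [] then
    let acc := theme_subjects.foldl (fun (acc : List Int × List Bool) p =>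
      match (PySem.Dict.mk pvReverse).get? p.1 with
      | some i => (acc.1.set i (acc.1.getD i 0 + p.2), acc.2.set i true)
      | none => acc)  -- unreachable: every filtered key is a key of the reverse index
      ([0, 0, 0, 0], [false, false, false, false])
    let result := (List.range 4).filterMap (fun i =>
      if acc.2.getD i false then some ((pvThemeDict.getD i ("", [])).1, acc.1.getD i 0) else none)
    (theme_subjects, some result)
  else (subjects, none)

-- ===== PRECONDITION & SPEC =====
-- Pre_ requires pairwise-distinct keys: the argument is a Python dict, and an association
-- list with a duplicated key does not encode one.
def Pre_check_theme (subjects : List (String × Int)) : Prop := (subjects.map Prod.fst).Nodup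
instance (subjects : List (String × Int)) : Decidable (Pre_check_theme subjects) := by unfold Pre_check_theme; infer_instance
def pvWitness_check_theme : (List (String × Int)) := [("Oncology", 2), ("Urology", 3), ("xyz", 9)]
def Spec_check_theme (subjects : List (String × Int)) (out : (List (String × Int)) × (Option (List (String × Int)))) : Prop := out = check_theme_alt subjects
instance (subjects : List (String × Int)) (out : (List (String × Int)) × (Option (List (String × Int)))) : Decidable (Spec_check_theme subjects out) := by unfold Spec_check_theme; infer_instance

-- ===== CLAIM (what is proved, stated in full; the proofs are below) =====
def Claim_equal_check_theme : Prop := ∀ (subjects : List (String × Int)), Dom_check_theme subjects → Pre_check_theme subjects → Spec_check_theme subjects (check_theme subjects)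

-- ===== LEMMAS AND PROOFS =====

-- the value of theme `S` accumulated from `ts`, and whether any subject of `ts` hit `S`
def pvSum (S : List String) (ts : List (String × Int)) : Int :=
  ((ts.filter (fun p => S.contains p.1)).map Prod.snd).sum
def pvHit (S : List String) (ts : List (String × Int)) : Bool :=
  ts.any (fun p => S.contains p.1)

theorem pv_rev_keys : pvReverse.map Prod.fst = pvDataSet := by decide

theorem pv_get?_mk_isSome {κ ν : Type} [BEq κ] [LawfulBEq κ] (l : List (κ × ν)) (k : κ) :
    ((PySem.Dict.mk l).get? k).isSome = (l.map Prod.fst).contains k := by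
  induction l with
  | nil => rfl
  | cons p l ih =>
      obtain ⟨a, b⟩ := p
      rw [PySem.Dict.get?_mk_cons]
      by_cases h : a = k
      · simp [h]
      · simp [h, Ne.symm h, ih]

theorem pv_get?_mk_mem {κ ν : Type} [BEq κ] [LawfulBEq κ] (l : List (κ × ν)) (k : κ) (v : ν)
    (h : (PySem.Dict.mk l).get? k = some v) : (k, v) ∈ l := by
  induction l with
  | nil => exact nomatch h
  | cons p l ih =>
      obtain ⟨a, b⟩ := p
      rw [PySem.Dict.get?_mk_cons] at h
      by_cases hk : a = k
      · subst hk
        simp only [BEq.rfl, if_pos] at h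
        obtain rfl : b = v := by injection h
        exact List.mem_cons_self ..
      · rw [if_neg (by simp [hk])] at h
        exact List.mem_cons_of_mem _ (ih h)

-- each reverse-index entry's subject lies in exactly the theme set of its slot (finite check)
theorem pv_classify : ∀ p ∈ pvReverse,
    pvSetCancer.contains p.1 = decide (p.2 = 0) ∧ pvSetTriple.contains p.1 = decide (p.2 = 1) ∧
    pvSetNMHA.contains p.1 = decide (p.2 = 2) ∧ pvSetNCD.contains p.1 = decide (p.2 = 3) ∧
    p.2 < 4 := by decide

theorem pv_hit_false_sum (S : List String) (ts : List (String × Int)) (h : pvHit S ts = false) :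
    pvSum S ts = 0 := by
  unfold pvHit at h
  unfold pvSum
  rw [List.filter_eq_nil_iff.mpr]
  · simp
  · intro p hp
    simp only [List.any_eq_false] at h
    exact h p hp

-- A's inner loop over ts (with the looked-up value already reduced to the pair's own value):
-- it touches only key t, adding the total of the hits
theorem pv_innerA (S : List String) (t : String) (ts : List (String × Int)) (d : PySem.Dict String Int) :
    ts.foldl (fun d p => if S.contains p.1 then d.insert t (d.getD t 0 + p.2) else d) d
      = if pvHit S ts then d.insert t (d.getD t 0 + pvSum S ts) else d := by
  induction ts generalizing d with
  | nil => simp [pvHit]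
  | cons p ts ih =>
      simp only [List.foldl_cons]
      by_cases hc : S.contains p.1 = true
      · have hm : p.1 ∈ S := by simpa using hc
        rw [if_pos hc, ih]
        have hhit : pvHit S (p :: ts) = true := by simp [pvHit, hm]
        have hsum : pvSum S (p :: ts) = p.2 + pvSum S ts := by
          simp [pvSum, hm]
        cases hh : pvHit S ts
        · have hz := pv_hit_false_sum S ts hh
          simp [hhit, hsum, hz]
        · simp [hhit, hsum, PySem.Dict.getD_insert_self, PySem.Dict.insert_insert_self, add_assoc]
      · have hm : p.1 ∉ S := by simpa using hc
        rw [if_neg hc, ih]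
        have h1 : pvHit S (p :: ts) = pvHit S ts := by simp [pvHit, hm]
        have h2 : pvSum S (p :: ts) = pvSum S ts := by simp [pvSum, hm]
        rw [h1, h2]

-- A's inner loop as written (value looked up in the dict) equals the reduced form, given unique keys
theorem pv_innerA' (S : List String) (t : String) (ts : List (String × Int))
    (hnd : (ts.map Prod.fst).Nodup) (d : PySem.Dict String Int) :
    ts.foldl (fun d p => if S.contains p.1 then
        d.insert t (d.getD t 0 + (PySem.Dict.mk ts).getD p.1 0) else d) d
      = if pvHit S ts then d.insert t (d.getD t 0 + pvSum S ts) else d := by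
  rw [PySem.List.foldl_congr_mem ts _
      (fun d p => if S.contains p.1 then d.insert t (d.getD t 0 + p.2) else d) d ?_]
  · exact pv_innerA S t ts d
  · intro acc p hp
    have hv : (PySem.Dict.mk ts).getD p.1 0 = p.2 := by
      apply PySem.Dict.getD_of_mem_items
      · simpa using hp
      · simpa [PySem.Dict.keys_mk] using hnd
    rw [hv]

-- B's accumulator loop computes the four theme sums and hit flags in one pass
theorem pv_foldB (ts : List (String × Int)) (a b c d : Int) (e f g h : Bool) :
    (∀ p ∈ ts, (((PySem.Dict.mk pvReverse).get? p.1)).isSome = true) →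
    ts.foldl (fun (acc : List Int × List Bool) p =>
        match (PySem.Dict.mk pvReverse).get? p.1 with
        | some i => (acc.1.set i (acc.1.getD i 0 + p.2), acc.2.set i true)
        | none => acc) ([a, b, c, d], [e, f, g, h])
      = ([a + pvSum pvSetCancer ts, b + pvSum pvSetTriple ts,
          c + pvSum pvSetNMHA ts, d + pvSum pvSetNCD ts],
         [e || pvHit pvSetCancer ts, f || pvHit pvSetTriple ts,
          g || pvHit pvSetNMHA ts, h || pvHit pvSetNCD ts]) := by
  induction ts generalizing a b c d e f g h with
  | nil => intro _; simp [pvHit, pvSum]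
  | cons p ts ih =>
      intro hmem
      have hmem' : ∀ q ∈ ts, (((PySem.Dict.mk pvReverse).get? q.1)).isSome = true := by
        intro q hq; exact hmem q (List.mem_cons_of_mem _ hq)
      obtain ⟨i, hi⟩ := Option.isSome_iff_exists.mp (hmem p (List.mem_cons_self ..))
      obtain ⟨h0, h1, h2, h3, hlt⟩ := pv_classify (p.1, i) (pv_get?_mk_mem _ _ _ hi)
      simp only [List.foldl_cons, hi]
      interval_cases i <;>
        · simp at h0 h1 h2 h3
          simp only [List.set_cons_zero, List.set_cons_succ,
            List.getD_cons_zero, List.getD_cons_succ]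
          rw [ih _ _ _ _ _ _ _ _ hmem']
          simp [pvSum, pvHit, h0, h1, h2, h3, add_assoc]

theorem pv_main : ∀ (subjects : List (String × Int)), Dom_check_theme subjects →
    Pre_check_theme subjects → check_theme subjects = check_theme_alt subjects := by
  intro subjects _ hpre
  have hfil : (subjects.filter (fun p => ((PySem.Dict.mk pvReverse).get? p.1).isSome))
      = subjects.filter (fun p => pvDataSet.contains p.1) := by
    apply List.filter_congr
    intro p _
    rw [pv_get?_mk_isSome, pv_rev_keys]
  simp only [check_theme, check_theme_alt, hfil]
  set ts := subjects.filter (fun p => pvDataSet.contains p.1) with hts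
  by_cases hne : ts = []
  · simp [hne]
  · have hnd : (ts.map Prod.fst).Nodup :=
      List.Nodup.sublist (List.Sublist.map _ List.filter_sublist) hpre
    have hmem : ∀ p ∈ ts, (((PySem.Dict.mk pvReverse).get? p.1)).isSome = true := by
      intro p hp
      rw [pv_get?_mk_isSome, pv_rev_keys]
      exact (List.mem_filter.mp hp).2
    rw [if_pos hne, if_pos hne]
    rw [pv_foldB ts 0 0 0 0 false false false false hmem]
    simp only [pvThemeDict, List.foldl_cons, List.foldl_nil]
    rw [pv_innerA' pvSetCancer "Cancer" ts hnd, pv_innerA' pvSetTriple "Triple I" ts hnd,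
        pv_innerA' pvSetNMHA "NMHA" ts hnd, pv_innerA' pvSetNCD "NCD" ts hnd]
    cases hC : pvHit pvSetCancer ts <;> cases hT : pvHit pvSetTriple ts <;>
      cases hN : pvHit pvSetNMHA ts <;> cases hD : pvHit pvSetNCD ts <;>
      rfl

-- ===== VERDICT (by name: the statement is the Claim_ definition above) =====
theorem check_theme_spec : Claim_equal_check_theme := by
  intro subjects hdom hpre
  unfold Spec_check_theme
  exact pv_main subjects hdom hpre
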